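-- pv_equiv track=rewrite | github.com/Sayan-404/pokerEconomics | poker_metrics/outs.py | boat
-- ===== SOURCE A (Python) =====
-- def boat(hole,board):
--     hand=hole+board
--     count=0
--     for i in range(len(hand)):
--         for j in range(i+1,len(hand)):
--             if (hand[i][0] == hand[j][0]):
--                 count += 1
--
--     if count == 5:
--         return 0
--     else:
--         if count == 2:
--             if len(hand) == 5:
--                 return 4
--             else:
--                 return 4
--         if count == 3:
--                 if len(hand)==5:
--                     return 6
--                 else:
--                     return 9
--         else:
--             return 0
-- ===== SOURCE B (Python) =====
-- def boat(hole, board):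
--     hand = hole + board
--     freq = {}
--     for card in hand:
--         freq[card[0]] = freq.get(card[0], 0) + 1
--     count = sum(f * (f - 1) // 2 for f in freq.values())
--     if count == 5:
--         return 0
--     else:
--         if count == 2:
--             if len(hand) == 5:
--                 return 4
--             else:
--                 return 4
--         if count == 3:
--             if len(hand) == 5:
--                 return 6
--             else:
--                 return 9
--         else:
--             return 0
-- ===== Notes on version B (the rewrite author's own statement) =====
-- stated objective: faster
-- what changed: Replaces the O(n^2) nested pair-comparison loop with a single-pass rank-frequency table whose values f contribute f*(f-1)//2 matching pairs each; the return table is unchanged.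
import Mathlib
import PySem

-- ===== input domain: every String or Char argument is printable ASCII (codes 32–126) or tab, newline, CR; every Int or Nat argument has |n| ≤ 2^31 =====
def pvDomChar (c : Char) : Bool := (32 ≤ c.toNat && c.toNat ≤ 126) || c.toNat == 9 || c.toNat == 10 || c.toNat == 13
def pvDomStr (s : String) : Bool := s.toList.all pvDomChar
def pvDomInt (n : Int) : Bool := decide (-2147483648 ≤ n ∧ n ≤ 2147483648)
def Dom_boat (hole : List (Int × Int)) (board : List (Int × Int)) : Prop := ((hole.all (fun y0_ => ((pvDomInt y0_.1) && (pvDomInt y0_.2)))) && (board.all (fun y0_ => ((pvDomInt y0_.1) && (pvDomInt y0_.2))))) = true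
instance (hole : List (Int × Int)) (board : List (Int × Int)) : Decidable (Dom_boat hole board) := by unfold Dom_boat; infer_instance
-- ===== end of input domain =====

-- B replaces A's O(n^2) nested pair-comparison loop by a one-pass rank-frequency
-- table (each frequency f contributes f*(f-1)//2 pairs); the return table is unchanged.

-- ===== PORT A =====
def boat (hole : List (Int × Int)) (board : List (Int × Int)) : Int :=
  let hand := hole ++ board
  let n : Int := hand.length
  let count : Int :=
    (PySem.List.pyRange 0 n 1).foldl (fun c i =>
      (PySem.List.pyRange (i + 1) n 1).foldl (fun c j =>
        if (PySem.List.pyGetD hand i ((0 : Int), (0 : Int))).1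
             = (PySem.List.pyGetD hand j ((0 : Int), (0 : Int))).1
        then c + 1 else c) c) 0
  if count = 5 then 0
  else
    if count = 2 then (if hand.length = 5 then 4 else 4)
    else if count = 3 then (if hand.length = 5 then 6 else 9)
    else 0

-- ===== PORT B =====
def boat_alt (hole : List (Int × Int)) (board : List (Int × Int)) : Int :=
  let hand := hole ++ board
  let freq : PySem.Dict Int Int :=
    hand.foldl (fun d card => d.insert card.1 (d.getD card.1 0 + 1)) PySem.Dict.empty
  let count : Int := (freq.values.map (fun f => PySem.Int.floordiv (f * (f - 1)) 2)).sum
  if count = 5 then 0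
  else
    if count = 2 then (if hand.length = 5 then 4 else 4)
    else if count = 3 then (if hand.length = 5 then 6 else 9)
    else 0

-- ===== PRECONDITION & SPEC =====
def Spec_boat (hole : List (Int × Int)) (board : List (Int × Int)) (out : Int) : Prop := out = boat_alt hole board
instance (hole : List (Int × Int)) (board : List (Int × Int)) (out : Int) : Decidable (Spec_boat hole board out) := by unfold Spec_boat; infer_instance

-- ===== CLAIM (what is proved, stated in full; the proofs are below) =====
def Claim_equal_boat : Prop := ∀ (hole : List (Int × Int)) (board : List (Int × Int)), Dom_boat hole board → Spec_boat hole board (boat hole board)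

-- ===== LEMMAS AND PROOFS =====

/-- Number of index pairs i < j with equal values, by structural recursion. -/
def pairs : List Int → Int
  | [] => 0
  | x :: xs => (xs.count x : Int) + pairs xs

/-- f*(f-1)//2 as an `Int` function. -/
def choose2 (c : Int) : Int := PySem.Int.floordiv (c * (c - 1)) 2

lemma choose2_succ (c : Int) : choose2 (c + 1) = choose2 c + c := by
  unfold choose2
  rw [PySem.Int.floordiv_eq_ediv_of_pos (by norm_num),
      PySem.Int.floordiv_eq_ediv_of_pos (by norm_num)]
  have h : (c + 1) * (c + 1 - 1) = c * (c - 1) + c * 2 := by ring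
  rw [h, Int.add_mul_ediv_right _ _ (by norm_num)]

lemma choose2_zero : choose2 0 = 0 := by decide

/-- Changing a function at a single element of a Nodup list shifts the sum by the
    difference at that element. -/
lemma sum_map_update (l : List Int) (x : Int) (g g' : Int → Int)
    (hnd : l.Nodup) (hx : x ∈ l) (h : ∀ k, k ≠ x → g' k = g k) :
    (l.map g').sum = (l.map g).sum + (g' x - g x) := by
  induction l with
  | nil => cases hx
  | cons a t ih =>
    simp only [List.map_cons, List.sum_cons]
    rcases List.mem_cons.mp hx with rfl | hxt
    · have : ∀ k ∈ t, g' k = g k := by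
        intro k hk
        exact h k (fun he => (List.nodup_cons.mp hnd).1 (he ▸ hk))
      rw [List.map_congr_left this]
      ring
    · have ha : g' a = g a := h a (fun he => (List.nodup_cons.mp hnd).1 (he ▸ hxt))
      rw [ha, ih (List.nodup_cons.mp hnd).2 hxt]
      ring

/-- Sum of choose2 of the multiplicities, over any Nodup list covering `vs`,
    equals the pair count. -/
lemma sum_choose2_aux (vs : List Int) (l : List Int)
    (hnd : l.Nodup) (hsub : ∀ v ∈ vs, v ∈ l) :
    (l.map (fun k => choose2 (vs.count k))).sum = pairs vs := by
  induction vs with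
  | nil =>
    simp [pairs, choose2_zero]
  | cons x t ih =>
    have hsub' : ∀ v ∈ t, v ∈ l := fun v hv => hsub v (List.mem_cons_of_mem _ hv)
    have hx : x ∈ l := hsub x List.mem_cons_self
    have hstep :
        (l.map (fun k => choose2 ((x :: t).count k))).sum
          = (l.map (fun k => choose2 (t.count k))).sum + (t.count x : Int) := by
      have := sum_map_update l x
        (fun k => choose2 (t.count k)) (fun k => choose2 ((x :: t).count k)) hnd hx
        (by
          intro k hk
          simp only [List.count_cons_of_ne hk.symm])
      rw [this]
      simp only [List.count_cons_self]
      push_cast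
      rw [choose2_succ]
      ring
    rw [hstep, ih hsub']
    simp [pairs]
    ring

/-- B's table sum computes `pairs`. -/
lemma alt_count_eq_pairs (vs : List Int) :
    (((PySem.Dict.counter vs).values).map (fun f => choose2 f)).sum = pairs vs := by
  have hvals : (PySem.Dict.counter vs).values
      = (PySem.Set.ofList vs).map (fun k => (vs.count k : Int)) := by
    have h := PySem.Dict.items_counter (xs := vs)
    simp only [PySem.Dict.values, h, List.map_map]
    rfl
  rw [hvals, List.map_map]
  exact sum_choose2_aux vs (PySem.Set.ofList vs) (PySem.Set.nodup_ofList vs)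
    (fun v hv => (PySem.Set.mem_ofList vs v).mpr hv)

/-- Index-sum form of A's nested loop equals `pairs` of the first components. -/
lemma sum_drop_count (hand : List (Int × Int)) :
    ((List.range hand.length).map (fun k =>
      (((hand.drop (k + 1)).countP
        (fun y => (hand.getD k ((0 : Int), (0 : Int))).1 = y.1)) : Int))).sum
      = pairs (hand.map (·.1)) := by
  induction hand with
  | nil => simp [pairs]
  | cons h t ih =>
    rw [List.length_cons, List.range_succ_eq_map]
    simp only [List.map_cons, List.map_map, List.sum_cons]
    have hmap :
        (List.range t.length).map ((fun k =>
          ((((h :: t).drop (k + 1)).countP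
            (fun y => ((h :: t).getD k ((0 : Int), (0 : Int))).1 = y.1)) : Int)) ∘ Nat.succ)
        = (List.range t.length).map (fun k =>
          (((t.drop (k + 1)).countP
            (fun y => (t.getD k ((0 : Int), (0 : Int))).1 = y.1)) : Int)) := by
      apply List.map_congr_left
      intro k _
      simp only [Function.comp, List.drop_succ_cons, List.getD_cons_succ]
    rw [hmap, ih]
    simp only [pairs, List.drop_succ_cons, List.drop_zero, List.getD_cons_zero]
    have hc : (t.map (·.1)).count h.1 = t.countP (fun y => decide (h.1 = y.1)) := by
      rw [List.count_eq_countP, List.countP_map]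
      apply List.countP_congr
      intro y _
      by_cases hyh : y.1 = h.1 <;> simp [Function.comp, hyh, Ne.symm]
    rw [hc]

/-- A counting fold is the initial value plus `countP`. -/
lemma foldl_count {α : Type} (l : List α) (p : α → Prop) [DecidablePred p] (a : Int) :
    l.foldl (fun c y => if p y then c + 1 else c) a
      = a + ((l.countP (fun y => decide (p y))) : Int) := by
  induction l generalizing a with
  | nil => simp
  | cons x t ih =>
    by_cases hx : p x <;> simp [ih, hx]
    omega

/-- A's nested index loop computes `pairs` of the first components. -/
lemma a_count_eq_pairs (hand : List (Int × Int)) :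
    ((PySem.List.pyRange 0 (hand.length : Int) 1).foldl (fun c i =>
      (PySem.List.pyRange (i + 1) (hand.length : Int) 1).foldl (fun c j =>
        if (PySem.List.pyGetD hand i ((0 : Int), (0 : Int))).1
             = (PySem.List.pyGetD hand j ((0 : Int), (0 : Int))).1
        then c + 1 else c) c) 0)
      = pairs (hand.map (·.1)) := by
  have hcong := PySem.List.foldl_congr_mem
    (l := PySem.List.pyRange 0 ((hand.length : Int)) 1) (init := (0 : Int))
    (f := fun (c : Int) (i : Int) =>
      (PySem.List.pyRange (i + 1) ((hand.length : Int)) 1).foldl (fun c j =>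
        if (PySem.List.pyGetD hand i ((0 : Int), (0 : Int))).1
             = (PySem.List.pyGetD hand j ((0 : Int), (0 : Int))).1
        then c + 1 else c) c)
    (g := fun (c : Int) (i : Int) => c +
      (((hand.drop (i + 1).toNat).countP
        (fun y => decide ((PySem.List.pyGetD hand i ((0 : Int), (0 : Int))).1 = y.1))) : Int))
    (by
      intro acc i hi
      simp only []
      rw [PySem.List.foldl_pyRange_pyGetD' hand ((0 : Int), (0 : Int))
        (fun c y => if (PySem.List.pyGetD hand i ((0 : Int), (0 : Int))).1 = y.1
                    then c + 1 else c) acc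
        (by
          have := (PySem.List.mem_pyRange_one).mp hi
          omega)]
      rw [foldl_count])
  rw [hcong]
  rw [PySem.List.foldl_add
    (g := fun (i : Int) =>
      (((hand.drop (i + 1).toNat).countP
        (fun y => decide ((PySem.List.pyGetD hand i ((0 : Int), (0 : Int))).1 = y.1))) : Int))]
  rw [PySem.List.pyRange_one, zero_add, List.map_map]
  have hlen : (((hand.length : Int)) - 0).toNat = hand.length := by omega
  rw [hlen]
  have hmap : (List.range hand.length).map
      ((fun (i : Int) =>
        (((hand.drop (i + 1).toNat).countP
          (fun y => decide ((PySem.List.pyGetD hand i ((0 : Int), (0 : Int))).1 = y.1))) : Int))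
        ∘ (fun (k : Nat) => (0 : Int) + (k : Int)))
      = (List.range hand.length).map (fun k =>
        (((hand.drop (k + 1)).countP
          (fun y => (hand.getD k ((0 : Int), (0 : Int))).1 = y.1)) : Int)) := by
    apply List.map_congr_left
    intro k _
    have h1 : ((k : Int) + 1).toNat = k + 1 := by omega
    simp only [Function.comp, zero_add, PySem.List.pyGetD_natCast, h1]
  rw [hmap, sum_drop_count]

lemma alt_freq_eq_counter (hand : List (Int × Int)) :
    hand.foldl (fun d card => d.insert card.1 (d.getD card.1 0 + 1)) PySem.Dict.empty
      = PySem.Dict.counter (hand.map (·.1)) := by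
  rw [← PySem.Dict.foldl_insert_getD_add_one_eq_counter, List.foldl_map]

-- ===== VERDICT (by name: the statement is the Claim_ definition above) =====
theorem boat_spec : Claim_equal_boat := by
  intro hole board _
  unfold Spec_boat
  simp only [boat, boat_alt]
  rw [a_count_eq_pairs (hole ++ board), alt_freq_eq_counter (hole ++ board)]
  have h := alt_count_eq_pairs ((hole ++ board).map (·.1))
  simp only [choose2] at h
  rw [h]
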